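-- pv_equiv track=rewrite | github.com/Elyablack/control-plane | action_runner/admin_audit.py | extract_log_path_from_prefixed_output
-- ===== SOURCE A (Python) =====
-- def extract_log_path_from_prefixed_output(text: str) -> tuple[str | None, str]:
--     log_path: str | None = None
--     body_start_index: int | None = None
--     lines = text.splitlines()
--
--     for idx, line in enumerate(lines):
--         if line.startswith("LOG_PATH:"):
--             log_path = line.removeprefix("LOG_PATH:").strip() or None
--         if line.strip() == "__AUDIT_BODY_BEGIN__":
--             body_start_index = idx + 1
--             break
--
--     if body_start_index is None:
--         return log_path, ""
--
--     audit_text = "\n".join(lines[body_start_index:]).strip()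
--     return log_path, audit_text
-- ===== SOURCE B (Python) =====
-- def extract_log_path_from_prefixed_output(text: str) -> tuple[str | None, str]:
--     lines = text.splitlines()
--     marker = next((i for i, l in enumerate(lines)
--                    if l.strip() == "__AUDIT_BODY_BEGIN__"), None)
--     head = lines if marker is None else lines[:marker + 1]
--     last = next((l for l in reversed(head) if l.startswith("LOG_PATH:")), None)
--     log_path = None if last is None else (last.removeprefix("LOG_PATH:").strip() or None)
--     if marker is None:
--         return log_path, ""
--     return log_path, "\n".join(lines[marker + 1:]).strip()
-- ===== Notes on version B (the rewrite author's own statement) =====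
-- stated objective: alternative
-- what changed: Replaces A's single fused scan (stateful overwrite + break) with two independent passes: first locate the marker line index, then scan the head backwards for the last LOG_PATH: line; the body is sliced from the marker index.
import Mathlib
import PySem

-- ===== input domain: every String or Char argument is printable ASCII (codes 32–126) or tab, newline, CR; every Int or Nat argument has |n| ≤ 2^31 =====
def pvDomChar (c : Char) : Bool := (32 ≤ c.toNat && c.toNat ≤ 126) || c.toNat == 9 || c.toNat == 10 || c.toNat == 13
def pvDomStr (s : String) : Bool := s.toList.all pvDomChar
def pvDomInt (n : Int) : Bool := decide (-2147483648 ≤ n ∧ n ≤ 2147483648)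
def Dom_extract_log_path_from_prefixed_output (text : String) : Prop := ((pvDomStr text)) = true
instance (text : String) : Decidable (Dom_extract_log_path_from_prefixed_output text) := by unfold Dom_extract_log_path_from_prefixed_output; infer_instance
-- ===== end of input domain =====

-- B separates boundary-finding from metadata extraction into two independent passes
-- (marker index first, then a backwards scan of the head for the last LOG_PATH: line)
-- instead of A's fused stateful scan; alternative decomposition, same cost.

-- l.removeprefix(p) (exact: drops p only when it is a prefix)
def pvRemoveprefix (l p : String) : String :=
  if PySem.Str.startswith l p then String.ofList (l.toList.drop p.toList.length) else l

-- "….strip() or None"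
def pvLogVal (l : String) : Option String :=
  let v := PySem.Str.strip (pvRemoveprefix l "LOG_PATH:")
  if v = "" then none else some v

-- ===== PORT A =====
def pvGoA (lines : List String) (lp : Option String) : Option String × String :=
  match lines with
  | [] => (lp, "")
  | l :: rest =>
      let lp' := if PySem.Str.startswith l "LOG_PATH:" then pvLogVal l else lp
      if PySem.Str.strip l = "__AUDIT_BODY_BEGIN__" then
        (lp', PySem.Str.strip (PySem.Str.join "\n" rest))
      else pvGoA rest lp'

def extract_log_path_from_prefixed_output (text : String) : Option String × String :=
  pvGoA (PySem.Str.splitlines text) none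

-- ===== PORT B =====
def extract_log_path_from_prefixed_output_alt (text : String) : Option String × String :=
  let lines := PySem.Str.splitlines text
  let marker := lines.findIdx? (fun l => PySem.Str.strip l == "__AUDIT_BODY_BEGIN__")
  let head := match marker with
    | none => lines
    | some i => lines.take (i + 1)
  let last := head.reverse.find? (fun l => PySem.Str.startswith l "LOG_PATH:")
  let log_path := match last with
    | none => none
    | some l => pvLogVal l
  match marker with
  | none => (log_path, "")
  | some i => (log_path, PySem.Str.strip (PySem.Str.join "\n" (lines.drop (i + 1))))

-- ===== PRECONDITION & SPEC =====
def Spec_extract_log_path_from_prefixed_output (text : String) (out : Option String × String) : Prop := out = extract_log_path_from_prefixed_output_alt text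
instance (text : String) (out : Option String × String) : Decidable (Spec_extract_log_path_from_prefixed_output text out) := by unfold Spec_extract_log_path_from_prefixed_output; infer_instance

-- ===== CLAIM (what is proved, stated in full; the proofs are below) =====
def Claim_equal_extract_log_path_from_prefixed_output : Prop := ∀ (text : String), Dom_extract_log_path_from_prefixed_output text → Spec_extract_log_path_from_prefixed_output text (extract_log_path_from_prefixed_output text)

-- ===== LEMMAS AND PROOFS =====

-- head of the scan (lines up to and including the marker, or all lines)
def pvHead (lines : List String) : List String :=
  match lines.findIdx? (fun l => PySem.Str.strip l == "__AUDIT_BODY_BEGIN__") with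
  | none => lines
  | some i => lines.take (i + 1)

-- body result
def pvBody (lines : List String) : String :=
  match lines.findIdx? (fun l => PySem.Str.strip l == "__AUDIT_BODY_BEGIN__") with
  | none => ""
  | some i => PySem.Str.strip (PySem.Str.join "\n" (lines.drop (i + 1)))

theorem pvGoA_eq (lines : List String) (lp : Option String) :
    pvGoA lines lp =
      ((match (pvHead lines).reverse.find? (fun l => PySem.Str.startswith l "LOG_PATH:") with
        | none => lp
        | some l => pvLogVal l), pvBody lines) := by
  induction lines generalizing lp with
  | nil => simp [pvGoA, pvHead, pvBody]
  | cons l rest ih =>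
    by_cases hm : PySem.Str.strip l = "__AUDIT_BODY_BEGIN__"
    · simp [pvGoA, pvHead, pvBody, hm, List.findIdx?_cons]
      split <;> rename_i h <;> simp [h]
    · have hm' : (PySem.Str.strip l == "__AUDIT_BODY_BEGIN__") = false := by
        simpa using hm
      simp only [pvGoA, pvHead, pvBody, List.findIdx?_cons, hm', if_neg hm,
        Bool.false_eq_true, if_false]
      rw [ih]
      cases hidx : rest.findIdx? (fun l => PySem.Str.strip l == "__AUDIT_BODY_BEGIN__") with
      | none =>
        simp only [pvHead, pvBody, hidx, Option.map_none]
        rw [List.reverse_cons, List.find?_append]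
        cases hfind : rest.reverse.find? (fun l => PySem.Str.startswith l "LOG_PATH:") with
        | none =>
          simp
          split <;> rename_i h <;> simp [h]
        | some l' => simp
      | some i =>
        simp only [pvHead, pvBody, hidx, Option.map_some, List.take_succ_cons, List.drop_succ_cons]
        rw [List.reverse_cons, List.find?_append]
        cases hfind : (rest.take (i + 1)).reverse.find? (fun l => PySem.Str.startswith l "LOG_PATH:") with
        | none =>
          simp
          split <;> rename_i h <;> simp [h]
        | some l' => simp

-- ===== VERDICT (by name: the statement is the Claim_ definition above) =====
theorem extract_log_path_from_prefixed_output_spec : Claim_equal_extract_log_path_from_prefixed_output := by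
  intro text _
  unfold Spec_extract_log_path_from_prefixed_output
  unfold extract_log_path_from_prefixed_output extract_log_path_from_prefixed_output_alt
  rw [pvGoA_eq]
  unfold pvHead pvBody
  cases hidx : (PySem.Str.splitlines text).findIdx? (fun l => PySem.Str.strip l == "__AUDIT_BODY_BEGIN__") with
  | none => simp only [hidx]
  | some i => simp only [hidx]
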